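-- pv_equiv track=rewrite | github.com/ArnasVaic/GoLA | scripts/utils.py | cycle_to_str
-- ===== SOURCE A (Python) =====
-- def cycle_to_str(cycle, size, ascii):
--   strings = []
--   ascii_lookup = { 0: '-', 1: 'O' }
--
--   for row in range(size):
--     for i in range(len(cycle)):
--       for col in range(size):
--         cell_value = cycle[i][row][col]
--         strings.append(ascii_lookup[cell_value] if ascii else f'{cell_value}')
--         strings.append(' ')
--       strings.append('  ')
--     strings.append('\n')
--   return ''.join(strings)
-- ===== SOURCE B (Python) =====
-- def cycle_to_str(cycle, size, ascii):
--   lookup = {0: '-', 1: 'O'}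
--
--   def glyph(v):
--     return lookup[v] if ascii else f'{v}'
--
--   grid_rows = [[''.join(glyph(g[r][c]) + ' ' for c in range(size)) + '  '
--                 for r in range(size)] for g in cycle]
--   return ''.join(''.join(rows[r] for rows in grid_rows) + '\n' for r in range(size))
-- ===== Notes on version B (the rewrite author's own statement) =====
-- stated objective: simpler
-- what changed: A builds one flat token list with three nested index loops (row-major over all grids at once); B formats each grid independently into its list of row-strings in one comprehension and then joins the r-th row-string of every grid per output line.
import Mathlib
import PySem

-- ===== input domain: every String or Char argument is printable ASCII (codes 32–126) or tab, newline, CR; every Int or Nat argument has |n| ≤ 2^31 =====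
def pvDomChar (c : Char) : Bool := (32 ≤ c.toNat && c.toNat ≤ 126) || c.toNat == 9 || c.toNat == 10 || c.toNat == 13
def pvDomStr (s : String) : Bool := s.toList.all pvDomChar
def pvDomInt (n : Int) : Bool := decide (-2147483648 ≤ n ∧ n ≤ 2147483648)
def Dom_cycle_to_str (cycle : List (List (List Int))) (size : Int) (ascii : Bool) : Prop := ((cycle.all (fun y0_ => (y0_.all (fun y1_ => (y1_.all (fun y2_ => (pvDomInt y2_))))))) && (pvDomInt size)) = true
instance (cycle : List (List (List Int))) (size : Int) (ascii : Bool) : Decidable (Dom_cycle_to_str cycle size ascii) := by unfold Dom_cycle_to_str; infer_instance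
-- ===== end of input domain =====

-- B formats each grid separately into row-strings and joins the r-th row-string of every grid per
-- output line, instead of A's single flat token list built by three nested index loops (same cost).

-- ===== PORT A =====
-- cycle[i][row][col] / ascii_lookup[cell] are ported with pyGetD / Dict.getD defaults; Pre_ excludes
-- exactly the inputs where the Python raises (IndexError/KeyError), so the defaults are never reached.
def cycle_to_str (cycle : List (List (List Int))) (size : Int) (ascii : Bool) : String :=
  let ascii_lookup : PySem.Dict Int String := PySem.Dict.ofList [(0, "-"), (1, "O")]
  let strings : List String :=
    (PySem.List.pyRange 0 size 1).foldl (fun acc row =>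
      ((PySem.List.pyRange 0 (cycle.length : Int) 1).foldl (fun acc i =>
        ((PySem.List.pyRange 0 size 1).foldl (fun acc col =>
          let cell_value := PySem.List.pyGetD (PySem.List.pyGetD (PySem.List.pyGetD cycle i []) row []) col 0
          (acc ++ [if ascii then ascii_lookup.getD cell_value "" else PySem.Int.toStr cell_value]) ++ [" "]) acc)
          ++ ["  "]) acc)
        ++ ["\n"]) []
  PySem.Str.join "" strings

-- ===== PORT B =====
-- Source B's local 'glyph' helper
def pvGlyph (ascii : Bool) (v : Int) : String :=
  if ascii then (PySem.Dict.ofList [((0 : Int), "-"), (1, "O")]).getD v "" else PySem.Int.toStr v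

def cycle_to_str_alt (cycle : List (List (List Int))) (size : Int) (ascii : Bool) : String :=
  let grid_rows : List (List String) := cycle.map (fun g =>
    (PySem.List.pyRange 0 size 1).map (fun r =>
      PySem.Str.join "" ((PySem.List.pyRange 0 size 1).map (fun c =>
        pvGlyph ascii (PySem.List.pyGetD (PySem.List.pyGetD g r []) c 0) ++ " ")) ++ "  "))
  PySem.Str.join "" ((PySem.List.pyRange 0 size 1).map (fun r =>
    PySem.Str.join "" (grid_rows.map (fun rows => PySem.List.pyGetD rows r "")) ++ "\n"))

-- ===== PRECONDITION & SPEC =====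
-- Pre_: exactly the inputs where the Python A returns normally: when size > 0, every grid has at
-- least `size` rows, each accessed row has at least `size` cells, and under ascii every accessed
-- cell is 0 or 1 (otherwise IndexError / KeyError).
def Pre_cycle_to_str (cycle : List (List (List Int))) (size : Int) (ascii : Bool) : Prop :=
  0 < size → ∀ g ∈ cycle, size ≤ (g.length : Int) ∧
    ∀ r ∈ g.take size.toNat, size ≤ (r.length : Int) ∧
      (ascii = true → ∀ v ∈ r.take size.toNat, v = 0 ∨ v = 1)
instance (cycle : List (List (List Int))) (size : Int) (ascii : Bool) : Decidable (Pre_cycle_to_str cycle size ascii) := by unfold Pre_cycle_to_str; infer_instance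
def pvWitness_cycle_to_str : List (List (List Int)) × Int × Bool := ([[[0, 1], [1, 0]], [[1, 1], [0, 0]]], 2, true)

def Spec_cycle_to_str (cycle : List (List (List Int))) (size : Int) (ascii : Bool) (out : String) : Prop := out = cycle_to_str_alt cycle size ascii
instance (cycle : List (List (List Int))) (size : Int) (ascii : Bool) (out : String) : Decidable (Spec_cycle_to_str cycle size ascii out) := by unfold Spec_cycle_to_str; infer_instance

-- ===== CLAIM (what is proved, stated in full; the proofs are below) =====
def Claim_equal_cycle_to_str : Prop := ∀ (cycle : List (List (List Int))) (size : Int) (ascii : Bool), Dom_cycle_to_str cycle size ascii → Pre_cycle_to_str cycle size ascii → Spec_cycle_to_str cycle size ascii (cycle_to_str cycle size ascii)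

-- ===== LEMMAS AND PROOFS =====

theorem pvIntercalate_nil (l : List (List Char)) : List.intercalate ([] : List Char) l = l.flatten := by
  induction l with
  | nil => simp [List.intercalate]
  | cons x xs ih =>
    cases xs with
    | nil => simp [List.intercalate]
    | cons y ys =>
      simp [List.intercalate] at ih ⊢
      simpa using ih

-- ''.join distributes over the list structure
theorem pvJoin_nil : PySem.Str.join "" [] = "" := rfl

theorem pvJoin_cons (x : String) (xs : List String) :
    PySem.Str.join "" (x :: xs) = x ++ PySem.Str.join "" xs := by
  simp [PySem.Str.join, PySem.Chars.join, pvIntercalate_nil]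

theorem pvJoin_append (xs ys : List String) :
    PySem.Str.join "" (xs ++ ys) = PySem.Str.join "" xs ++ PySem.Str.join "" ys := by
  induction xs with
  | nil => simp [pvJoin_nil]
  | cons x xs ih => simp [pvJoin_cons, ih, String.append_assoc]

theorem pvJoin_flatMap {α : Type} (l : List α) (G : α → List String) :
    PySem.Str.join "" (l.flatMap G) = PySem.Str.join "" (l.map (fun x => PySem.Str.join "" (G x))) := by
  induction l with
  | nil => rfl
  | cons x xs ih => simp [List.flatMap_cons, pvJoin_append, pvJoin_cons, ih]

-- A's loop shape: 'strings += pieces; strings.append(sep)' per element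
theorem pvFoldl_append_append {α β : Type} (L : List α) (G : α → List β) (c : β) :
    ∀ acc : List β, L.foldl (fun a x => (a ++ G x) ++ [c]) acc = acc ++ L.flatMap (fun x => G x ++ [c]) := by
  induction L with
  | nil => simp
  | cons y ys ih =>
    intro acc
    simp only [List.foldl_cons, List.flatMap_cons]
    rw [ih]
    simp

theorem cycle_to_str_eq_alt (cycle : List (List (List Int))) (size : Int) (ascii : Bool) :
    cycle_to_str cycle size ascii = cycle_to_str_alt cycle size ascii := by
  unfold cycle_to_str cycle_to_str_alt
  simp only [pvFoldl_append_append, List.nil_append]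
  rw [pvJoin_flatMap]
  apply congrArg
  apply List.map_congr_left
  intro r hr
  obtain ⟨hr0, hrs⟩ := (PySem.List.mem_pyRange_one).mp hr
  rw [List.map_map]
  simp only [Function.comp_def]
  simp only [PySem.List.pyGetD_map_pyRange_of_nonneg _ size r _ hr0 hrs]
  rw [pvJoin_append, pvJoin_flatMap, pvJoin_cons, pvJoin_nil]
  simp only [String.append_empty]
  conv_rhs => rw [← PySem.List.map_pyGetD_pyRange_zero' cycle ([] : List (List Int)), List.map_map]
  apply congrArg (fun s => s ++ "\n")
  apply congrArg
  apply List.map_congr_left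
  intro i _
  simp only [Function.comp_def]
  rw [pvJoin_append, pvJoin_flatMap, pvJoin_cons, pvJoin_nil]
  simp only [String.append_empty]
  apply congrArg (fun s => s ++ "  ")
  apply congrArg
  apply List.map_congr_left
  intro c _
  simp [pvJoin_cons, pvJoin_nil, pvGlyph, String.append_empty]

-- ===== VERDICT (by name: the statement is the Claim_ definition above) =====
theorem cycle_to_str_spec : Claim_equal_cycle_to_str := by
  intro cycle size ascii _ _
  exact cycle_to_str_eq_alt cycle size ascii
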